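-- pv_equiv track=rewrite | github.com/XHXIAIEIN/orchestrator | src/governance/stuck_detector.py | _find_repeating_pattern
-- ===== SOURCE A (Python) =====
-- def _find_repeating_pattern(seq: list[str], period: int, min_repeats: int) -> bool:
--     """Find a repeating subsequence of given period length."""
--     if len(seq) < period * min_repeats:
--         return False
--
--     # Slide a window and check if the pattern repeats
--     for start in range(len(seq) - period * min_repeats + 1):
--         pattern = tuple(seq[start:start + period])
--         repeats = 1
--         pos = start + period
--         while pos + period <= len(seq):
--             if tuple(seq[pos:pos + period]) == pattern:
--                 repeats += 1
--                 pos += period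
--             else:
--                 break
--         if repeats >= min_repeats and len(set(pattern)) > 1:
--             return True
--     return False
-- ===== SOURCE B (Python) =====
-- def _find_repeating_pattern(seq: list[str], period: int, min_repeats: int) -> bool:
--     """Find a repeating subsequence of given period length ."""
--     n = len(seq)
--     if period <= 0 or n < period * min_repeats:
--         return False
--     inf = n + period  # larger than any window width we test against
--     # Built back-to-front:
--     # run[i] = number of consecutive j >= i with seq[j] == seq[j + period]
--     # nd[i]  = distance from i to the next adjacent mismatch, inf-capped
--     run = [0]
--     nd = [inf]
--     for i in range(n - 1, -1, -1):
--         run.append(run[-1] + 1 if i + period < n and seq[i] == seq[i + period] else 0)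
--         nd.append(0 if i + 1 < n and seq[i] != seq[i + 1] else nd[-1] + 1)
--     run.reverse()
--     nd.reverse()
--     need = max(period * (min_repeats - 1), 0)
--     for start in range(min(n - period * min_repeats, n) + 1):
--         if run[start] >= need and nd[start] < period - 1:
--             return True
--     return False
-- ===== Notes on version B (the rewrite author's own statement) =====
-- stated objective: alternative
-- what changed: Replaces A's slide-a-window-and-rescan (re-slicing and re-comparing period-length blocks for every start, re-checking distinctness per window) with two back-to-front suffix tables (consecutive period-offset match run lengths, and distance to the next adjacent mismatch) plus a scan of starts that tests each start in O(1) against the tables.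
-- outside the precondition, e.g. on _find_repeating_pattern(['a', 'b', 'c'], -1, 1): A returns True, B returns False; on _find_repeating_pattern(['a', 'b', 'c'], 0, 1): A does not finish within the time limit, B returns False
import Mathlib
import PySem

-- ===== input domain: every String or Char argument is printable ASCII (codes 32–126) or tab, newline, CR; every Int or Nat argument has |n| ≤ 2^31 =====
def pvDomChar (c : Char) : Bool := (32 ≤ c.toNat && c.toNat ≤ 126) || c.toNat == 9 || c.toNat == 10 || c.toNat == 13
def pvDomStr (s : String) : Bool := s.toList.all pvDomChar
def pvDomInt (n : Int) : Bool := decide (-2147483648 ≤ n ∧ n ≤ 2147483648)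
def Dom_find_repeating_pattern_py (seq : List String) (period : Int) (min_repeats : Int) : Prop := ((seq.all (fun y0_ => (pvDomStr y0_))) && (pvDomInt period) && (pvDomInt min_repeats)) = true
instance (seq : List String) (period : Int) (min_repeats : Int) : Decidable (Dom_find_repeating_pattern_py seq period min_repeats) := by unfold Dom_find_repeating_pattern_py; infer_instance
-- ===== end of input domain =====

-- B replaces A's quadratic window-plus-rescan with two linear suffix tables (consecutive
-- period-offset matches; distance to the next adjacent mismatch) and a linear scan of starts.

-- ===== PORT A =====
def pvLoopA (seq pattern : List String) (period : Int) : Nat → Int → Int → Int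
  | 0, _, repeats => repeats
  | fuel+1, pos, repeats =>
    if pos + period ≤ (seq.length : Int) then
      if PySem.List.slice seq (some pos) (some (pos + period)) = pattern then
        pvLoopA seq pattern period fuel (pos + period) (repeats + 1)
      else repeats
    else repeats

-- the 'for start in range(...)' loop, with Python's early 'return True' (fuel = remaining starts)
def pvOuterA (seq : List String) (period min_repeats : Int) : Nat → Int → Bool
  | 0, _ => false
  | fuel+1, start =>
    if start < (seq.length : Int) - period * min_repeats + 1 then
      let pattern := PySem.List.slice seq (some start) (some (start + period))
      let repeats := pvLoopA seq pattern period (seq.length + 1) (start + period) 1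
      if decide (min_repeats ≤ repeats) && decide (1 < (PySem.Set.ofList pattern).length) then true
      else pvOuterA seq period min_repeats fuel (start + 1)
    else false

def find_repeating_pattern_py (seq : List String) (period : Int) (min_repeats : Int) : Bool :=
  if (seq.length : Int) < period * min_repeats then false
  else pvOuterA seq period min_repeats ((seq.length : Int) - period * min_repeats + 1).toNat 0

-- ===== PORT B =====
-- run[i] = # consecutive j ≥ i with seq[j] == seq[j+period]  (built back-to-front, suffix recursion)
def pvRunT (p : Nat) : List String → List Int
  | [] => [0]
  | a :: t => (if (a :: t)[p]? = some a then (pvRunT p t).headD 0 + 1 else 0) :: pvRunT p t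

-- nd[i] = distance from i to the next adjacent mismatch, capped by inf
def pvNdT (inf : Int) : List String → List Int
  | [] => [inf]
  | a :: t => (if t.head? ≠ none ∧ t.head? ≠ some a then 0 else (pvNdT inf t).headD 0 + 1) :: pvNdT inf t

def find_repeating_pattern_py_alt (seq : List String) (period : Int) (min_repeats : Int) : Bool :=
  if period ≤ 0 || (seq.length : Int) < period * min_repeats then false
  else
    let run := pvRunT period.toNat seq
    let nd := pvNdT ((seq.length : Int) + period) seq
    let need := max (period * (min_repeats - 1)) 0
    (PySem.List.pyRange 0 (min ((seq.length : Int) - period * min_repeats) (seq.length : Int) + 1) 1).any fun start =>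
      decide (need ≤ run.getD start.toNat 0) && decide (nd.getD start.toNat 0 < period - 1)

-- ===== PRECONDITION & SPEC =====
-- Pre_ excludes non-positive periods whose length guard does not fire, on which A either
-- diverges (the empty pattern keeps matching forever) or returns a value accidental to
-- Python's negative-slice wraparound.
def Pre_find_repeating_pattern_py (seq : List String) (period : Int) (min_repeats : Int) : Prop :=
  1 ≤ period ∨ (seq.length : Int) < period * min_repeats

instance (seq : List String) (period : Int) (min_repeats : Int) : Decidable (Pre_find_repeating_pattern_py seq period min_repeats) := by unfold Pre_find_repeating_pattern_py; infer_instance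

def pvWitness_find_repeating_pattern_py : List String × Int × Int := (["a", "b", "a", "b"], 2, 2)

def Spec_find_repeating_pattern_py (seq : List String) (period : Int) (min_repeats : Int) (out : Bool) : Prop := out = find_repeating_pattern_py_alt seq period min_repeats
instance (seq : List String) (period : Int) (min_repeats : Int) (out : Bool) : Decidable (Spec_find_repeating_pattern_py seq period min_repeats out) := by unfold Spec_find_repeating_pattern_py; infer_instance

-- ===== CLAIM (what is proved, stated in full; the proofs are below) =====
def Claim_equal_find_repeating_pattern_py : Prop := ∀ (seq : List String) (period : Int) (min_repeats : Int), Dom_find_repeating_pattern_py seq period min_repeats → Pre_find_repeating_pattern_py seq period min_repeats → Spec_find_repeating_pattern_py seq period min_repeats (find_repeating_pattern_py seq period min_repeats)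

-- ===== LEMMAS AND PROOFS =====

-- ---- generic helpers ----
theorem pv_any_congr_mem {α : Type} (l : List α) (f g : α → Bool)
    (h : ∀ x ∈ l, f x = g x) : l.any f = l.any g := by
  induction l with
  | nil => rfl
  | cons a t ih => simp only [List.any_cons, h a (by simp), ih (fun x hx => h x (by simp [hx]))]

theorem pvOuterA_eq_any (seq : List String) (period min_repeats : Int) :
    ∀ (fuel : Nat) (start : Int),
      ((seq.length : Int) - period * min_repeats + 1 - start).toNat ≤ fuel →
      pvOuterA seq period min_repeats fuel start =
        (PySem.List.pyRange start ((seq.length : Int) - period * min_repeats + 1) 1).any fun s =>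
          decide (min_repeats ≤ pvLoopA seq (PySem.List.slice seq (some s) (some (s + period))) period
              (seq.length + 1) (s + period) 1) &&
            decide (1 < (PySem.Set.ofList (PySem.List.slice seq (some s) (some (s + period)))).length) := by
  intro fuel
  induction fuel with
  | zero =>
    intro start h
    rw [pvOuterA, PySem.List.pyRange_one_eq_nil (by omega)]
    rfl
  | succ f ih =>
    intro start h
    rw [pvOuterA]
    by_cases hlt : start < (seq.length : Int) - period * min_repeats + 1
    · rw [if_pos hlt, PySem.List.pyRange_one_cons hlt, List.any_cons]
      simp only
      split
      · rename_i hcond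
        simp [hcond]
      · rename_i hcond
        rw [ih (start + 1) (by omega)]
        simp [hcond]
    · rw [if_neg hlt, PySem.List.pyRange_one_eq_nil (by omega)]
      rfl

-- ---- table lookups reduce to suffix heads ----
theorem pvRunT_getD (p : Nat) (l : List String) (i : Nat) (hi : i ≤ l.length) :
    (pvRunT p l).getD i 0 = (pvRunT p (l.drop i)).headD 0 := by
  induction l generalizing i with
  | nil =>
    have : i = 0 := by simpa using hi
    subst this; simp [pvRunT]
  | cons a t ih =>
    cases i with
    | zero => cases t <;> simp [pvRunT]
    | succ j => simpa [pvRunT] using ih j (by simpa using hi)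

theorem pvNdT_getD (inf : Int) (l : List String) (i : Nat) (hi : i ≤ l.length) :
    (pvNdT inf l).getD i 0 = (pvNdT inf (l.drop i)).headD 0 := by
  induction l generalizing i with
  | nil =>
    have : i = 0 := by simpa using hi
    subst this; simp [pvNdT]
  | cons a t ih =>
    cases i with
    | zero => cases t <;> simp [pvNdT]
    | succ j => simpa [pvNdT] using ih j (by simpa using hi)

theorem pvRunT_head_nonneg (p : Nat) (l : List String) : 0 ≤ (pvRunT p l).headD 0 := by
  induction l with
  | nil => simp [pvRunT]
  | cons a t ih => simp only [pvRunT, List.headD_cons]; split <;> omega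

theorem pvNdT_head_nonneg (inf : Int) (hinf : 0 ≤ inf) (l : List String) :
    0 ≤ (pvNdT inf l).headD 0 := by
  induction l with
  | nil => simpa [pvNdT]
  | cons a t ih => simp only [pvNdT, List.headD_cons]; split <;> omega

-- ---- characterisation of the run table ----
theorem pvRunT_head_ge (p : Nat) (d : Nat) (l : List String) :
    ((d : Int) ≤ (pvRunT p l).headD 0) ↔ (∀ k < d, ∃ x, l[k]? = some x ∧ l[k + p]? = some x) := by
  induction d generalizing l with
  | zero => simpa using pvRunT_head_nonneg p l
  | succ d ih =>
    cases l with
    | nil =>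
      simp only [pvRunT, List.headD_cons]
      constructor
      · intro h; exfalso; omega
      · intro H; exfalso; obtain ⟨x, hx, _⟩ := H 0 (by omega); simp at hx
    | cons a t =>
      simp only [pvRunT, List.headD_cons]
      by_cases h : (a :: t)[p]? = some a
      · rw [if_pos h]
        have hcast : (((d+1 : Nat)) : Int) ≤ (pvRunT p t).headD 0 + 1 ↔ ((d : Nat) : Int) ≤ (pvRunT p t).headD 0 := by
          push_cast; omega
        rw [hcast, ih]
        constructor
        · intro H k hk
          cases k with
          | zero => exact ⟨a, by simp, by simpa using h⟩
          | succ j =>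
            obtain ⟨x, h1, h2⟩ := H j (by omega)
            refine ⟨x, by simpa using h1, ?_⟩
            have hj : j + 1 + p = (j + p) + 1 := by omega
            rw [hj]; simpa using h2
        · intro H k hk
          obtain ⟨x, h1, h2⟩ := H (k+1) (by omega)
          refine ⟨x, by simpa using h1, ?_⟩
          have hj : k + 1 + p = (k + p) + 1 := by omega
          rw [hj] at h2; simpa using h2
      · rw [if_neg h]
        constructor
        · intro hh; exfalso; omega
        · intro H; exfalso
          obtain ⟨x, h1, h2⟩ := H 0 (by omega)
          simp only [List.getElem?_cons_zero, Option.some.injEq] at h1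
          subst h1
          exact h (by simpa using h2)

-- ---- characterisation of the nd table ----
theorem pvNdT_head_lt (inf : Int) (d : Nat) (l : List String) (hd : (d : Int) ≤ inf) :
    ((pvNdT inf l).headD 0 < (d : Int)) ↔ (∃ j, j + 1 < d + 1 ∧ j + 1 < l.length ∧ l[j]? ≠ l[j + 1]?) := by
  induction l generalizing d with
  | nil =>
    simp only [pvNdT, List.headD_cons, List.length_nil]
    constructor
    · intro h; exfalso; omega
    · intro ⟨j, _, hj, _⟩; exfalso; omega
  | cons a t ih =>
    simp only [pvNdT, List.headD_cons]
    by_cases h : t.head? ≠ none ∧ t.head? ≠ some a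
    · rw [if_pos h]
      constructor
      · intro hd'
        have hdpos : 0 < d := by omega
        refine ⟨0, by omega, ?_, ?_⟩
        · cases t with
          | nil => exact absurd rfl h.1
          | cons b t' => simp
        · cases t with
          | nil => exact absurd rfl h.1
          | cons b t' =>
            simp only [List.getElem?_cons_zero, List.getElem?_cons_succ, ne_eq, Option.some.injEq]
            intro hab
            exact h.2 (by simp [hab])
      · rintro ⟨j, hj, _, _⟩; omega
    · rw [if_neg h]
      push_neg at h
      cases d with
      | zero =>
        have h0 := pvNdT_head_nonneg inf (by omega) t
        constructor
        · intro hh; exfalso; omega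
        · rintro ⟨j, hj, _, _⟩; omega
      | succ e =>
        have hiff := ih e (by push_cast; push_cast at hd; omega)
        have hstep : (pvNdT inf t).headD 0 + 1 < ((e+1 : Nat) : Int) ↔ (pvNdT inf t).headD 0 < ((e : Nat) : Int) := by
          push_cast; omega
        rw [hstep, hiff]
        constructor
        · rintro ⟨j, hj1, hj2, hj3⟩
          refine ⟨j + 1, by omega, by simpa using hj2, ?_⟩
          simpa using hj3
        · rintro ⟨j, hj1, hj2, hj3⟩
          cases j with
          | zero =>
            exfalso
            simp only [List.length_cons] at hj2
            cases ht : t.head? with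
            | none => cases t with
              | nil => simp at hj2
              | cons b t' => simp at ht
            | some b =>
              have hb : b = a := by
                by_cases hba : t.head? = some a
                · rw [ht] at hba; simpa using hba
                · exact absurd (h (by simp [ht])) hba
              apply hj3
              cases t with
              | nil => simp at ht
              | cons c t' =>
                simp only [List.head?_cons, Option.some.injEq] at ht
                simp [ht, hb]
          | succ i =>
            refine ⟨i, by omega, by simpa using hj2, ?_⟩
            simpa using hj3

-- ---- set-size criterion ----
theorem pv_set_card_gt_one (xs : List String) :
    (1 < (PySem.Set.ofList xs).length) ↔ (∃ a ∈ xs, ∃ b ∈ xs, a ≠ b) := by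
  have hmem : ∀ x : String, x ∈ PySem.Set.ofList xs ↔ x ∈ xs := fun x => PySem.Set.mem_ofList xs x
  have hnd : (PySem.Set.ofList xs).Nodup := PySem.Set.nodup_ofList xs
  constructor
  · intro h
    match hs : PySem.Set.ofList xs with
    | [] => rw [hs] at h; simp at h
    | [a] => rw [hs] at h; simp at h
    | a :: b :: t =>
      have hab : a ≠ b := by
        rw [hs] at hnd
        intro he; subst he
        simp [List.nodup_cons] at hnd
      exact ⟨a, (hmem a).1 (by rw [hs]; simp), b, (hmem b).1 (by rw [hs]; simp), hab⟩
  · rintro ⟨a, ha, b, hb, hab⟩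
    by_contra hle
    push_neg at hle
    have ha' : a ∈ PySem.Set.ofList xs := (hmem a).2 ha
    have hb' : b ∈ PySem.Set.ofList xs := (hmem b).2 hb
    cases hs : PySem.Set.ofList xs with
    | nil => rw [hs] at ha'; simp at ha'
    | cons c t =>
      cases t with
      | nil =>
        rw [hs] at ha' hb'
        simp only [List.mem_singleton] at ha' hb'
        exact hab (ha'.trans hb'.symm)
      | cons d t' => rw [hs] at hle; simp at hle

theorem pv_all_adj_eq (xs : List String) (h : ∀ j, j + 1 < xs.length → xs[j]? = xs[j+1]?) :
    ∀ a ∈ xs, ∀ b ∈ xs, a = b := by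
  induction xs with
  | nil => simp
  | cons x t ih =>
    have ht : ∀ j, j + 1 < t.length → t[j]? = t[j+1]? := by
      intro j hj
      have := h (j+1) (by simp; omega)
      simpa using this
    cases t with
    | nil => simp
    | cons y t' =>
      have hxy : x = y := by
        have := h 0 (by simp)
        simpa using this
      intro a ha b hb
      have key : ∀ c ∈ x :: y :: t', c = y := by
        intro c hc
        rcases List.mem_cons.1 hc with rfl | hc'
        · exact hxy
        · exact ih ht c hc' y (by simp)
      rw [key a ha, key b hb]

theorem pv_exists_ne_iff_adjacent (xs : List String) :
    (∃ a ∈ xs, ∃ b ∈ xs, a ≠ b) ↔ (∃ j, j + 1 < xs.length ∧ xs[j]? ≠ xs[j + 1]?) := by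
  constructor
  · rintro ⟨a, ha, b, hb, hab⟩
    by_contra hno
    push_neg at hno
    exact hab (pv_all_adj_eq xs hno a ha b hb)
  · rintro ⟨j, hj, hne⟩
    have h1 : j < xs.length := by omega
    refine ⟨xs[j], List.getElem_mem _, xs[j+1], List.getElem_mem _, ?_⟩
    intro he
    apply hne
    rw [List.getElem?_eq_getElem h1, List.getElem?_eq_getElem hj, he]

-- ---- loop A characterisation ----
theorem pvLoopA_ge_init (seq pattern : List String) (period : Int) (fuel : Nat) (pos r : Int) :
    r ≤ pvLoopA seq pattern period fuel pos r := by
  induction fuel generalizing pos r with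
  | zero => simp [pvLoopA]
  | succ f ih =>
    simp only [pvLoopA]
    split
    · split
      · have := ih (pos + period) (r + 1); omega
      · omega
    · omega

theorem pvLoopA_ge (seq pattern : List String) (period : Int) (m : Nat) :
    ∀ (fuel : Nat), m ≤ fuel → ∀ (pos r : Int),
      ((r + m ≤ pvLoopA seq pattern period fuel pos r) ↔
        (∀ k < m, pos + k * period + period ≤ (seq.length : Int) ∧
          PySem.List.slice seq (some (pos + k * period)) (some (pos + k * period + period)) = pattern)) := by
  induction m with
  | zero =>
    intro fuel _ pos r
    constructor
    · intro _ k hk; omega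
    · intro _
      have := pvLoopA_ge_init seq pattern period fuel pos r
      push_cast; omega
  | succ m ih =>
    intro fuel hf pos r
    cases fuel with
    | zero => omega
    | succ f =>
      simp only [pvLoopA]
      by_cases h1 : pos + period ≤ (seq.length : Int)
      · rw [if_pos h1]
        by_cases h2 : PySem.List.slice seq (some pos) (some (pos + period)) = pattern
        · rw [if_pos h2]
          have hiff := ih f (by omega) (pos + period) (r + 1)
          have hc : r + ((m+1 : Nat) : Int) = (r + 1) + ((m : Nat) : Int) := by push_cast; ring
          rw [hc, hiff]
          constructor
          · intro H k hk
            cases k with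
            | zero => simp only [Nat.cast_zero, zero_mul, add_zero]; exact ⟨h1, h2⟩
            | succ j =>
              have hh := H j (by omega)
              have harg : pos + ((j+1 : Nat) : Int) * period = pos + period + ((j : Nat) : Int) * period := by
                push_cast; ring
              rw [harg]
              exact hh
          · intro H j hj
            have hh := H (j+1) (by omega)
            have harg : pos + ((j+1 : Nat) : Int) * period = pos + period + ((j : Nat) : Int) * period := by
              push_cast; ring
            rw [harg] at hh
            exact hh
        · rw [if_neg h2]
          constructor
          · intro H; exfalso; omega
          · intro H
            exfalso
            have := H 0 (by omega)
            simp only [Nat.cast_zero, zero_mul, add_zero] at this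
            exact h2 this.2
      · rw [if_neg h1]
        constructor
        · intro H; exfalso; omega
        · intro H
          exfalso
          have := H 0 (by omega)
          simp only [Nat.cast_zero, zero_mul, add_zero] at this
          exact h1 this.1

theorem pv_getElem?_take {α : Type} (l : List α) (n i : Nat) (h : i < n) :
    (l.take n)[i]? = l[i]? := by
  rw [List.getElem?_take, if_pos h]

theorem pv_slice_take_drop (seq : List String) (a period : Int) (hp : 1 ≤ period) (ha : 0 ≤ a) :
    PySem.List.slice seq (some a) (some (a + period)) = (seq.drop a.toNat).take period.toNat := by
  rw [PySem.List.slice_toNat _ ha (by omega)]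
  congr 1
  omega

theorem pv_slice_eq_iff (seq : List String) (period a b : Int)
    (hp : 1 ≤ period) (ha : 0 ≤ a) (hb : 0 ≤ b)
    (han : a + period ≤ (seq.length : Int)) (hbn : b + period ≤ (seq.length : Int)) :
    (PySem.List.slice seq (some a) (some (a + period)) = PySem.List.slice seq (some b) (some (b + period))) ↔
      (∀ i < period.toNat, seq[a.toNat + i]? = seq[b.toNat + i]?) := by
  rw [pv_slice_take_drop seq a period hp ha, pv_slice_take_drop seq b period hp hb]
  constructor
  · intro h i hi
    have hcg := congrArg (fun l => l[i]?) h
    simp only at hcg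
    rw [pv_getElem?_take _ _ _ hi, pv_getElem?_take _ _ _ hi, List.getElem?_drop, List.getElem?_drop] at hcg
    exact hcg
  · intro h
    apply List.ext_getElem?
    intro i
    by_cases hi : i < period.toNat
    · rw [pv_getElem?_take _ _ _ hi, pv_getElem?_take _ _ _ hi, List.getElem?_drop, List.getElem?_drop]
      exact h i hi
    · rw [List.getElem?_eq_none, List.getElem?_eq_none]
      · simp only [List.length_take, List.length_drop]; omega
      · simp only [List.length_take, List.length_drop]; omega

theorem pv_chain (f : Nat → Option String) (p m : Nat) (hp : 0 < p) :
    (∀ k < m, ∀ i < p, f ((k+1)*p + i) = f i) ↔ (∀ j < p*m, f j = f (j + p)) := by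
  constructor
  · intro H j hj
    have hi : j % p < p := Nat.mod_lt _ hp
    have hdm := Nat.div_add_mod j p
    have hq : j / p < m := by
      by_contra hge
      push_neg at hge
      have h1 : p * m ≤ p * (j / p) := Nat.mul_le_mul_left p hge
      omega
    have hG : ∀ q, q ≤ m → ∀ i, i < p → f (q * p + i) = f i := by
      intro q hq' i hi'
      cases q with
      | zero => simp
      | succ q0 => exact H q0 (by omega) i hi'
    have h2 : (j / p) * p + j % p = j := by rw [Nat.mul_comm]; omega
    have h2' : (j / p + 1) * p + j % p = j + p := by rw [Nat.succ_mul, Nat.mul_comm]; omega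
    have e1 := hG (j / p) (by omega) (j % p) hi
    have e2 := hG (j / p + 1) (by omega) (j % p) hi
    rw [h2] at e1
    rw [h2'] at e2
    rw [e1, e2]
  · intro H
    have hG : ∀ q, q ≤ m → ∀ i, i < p → f (q * p + i) = f i := by
      intro q
      induction q with
      | zero => intro _ i _; simp
      | succ q0 ihq =>
        intro hq i hi
        have h3 : (q0 + 1) * p ≤ m * p := Nat.mul_le_mul_right p (by omega)
        have h4 : (q0 + 1) * p = q0 * p + p := by rw [Nat.succ_mul]
        have hlt : q0 * p + i < p * m := by rw [Nat.mul_comm p m]; omega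
        have h6 : (q0 + 1) * p + i = (q0 * p + i) + p := by omega
        rw [h6, ← H (q0 * p + i) hlt]
        exact ihq (by omega) i hi
    intro k hk i hi
    exact hG (k + 1) (by omega) i hi

theorem pv_bridge (seq : List String) (period start : Int) (m : Nat)
    (hp : 1 ≤ period) (h0 : 0 ≤ start)
    (hin : start + period * (1 + (m : Int)) ≤ (seq.length : Int)) :
    ((∀ k < m, start + period + (k : Int) * period + period ≤ (seq.length : Int) ∧
        PySem.List.slice seq (some (start + period + (k : Int) * period)) (some (start + period + (k : Int) * period + period)) =
          PySem.List.slice seq (some start) (some (start + period))) ↔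
      (∀ j < period.toNat * m, ∃ x, (seq.drop start.toNat)[j]? = some x ∧ (seq.drop start.toNat)[j + period.toNat]? = some x)) := by
  have hkp : ((period.toNat : Nat) : Int) = period := Int.toNat_of_nonneg (by omega)
  have hps : ((start.toNat : Nat) : Int) = start := Int.toNat_of_nonneg h0
  have hinN : ((start.toNat + period.toNat * (m + 1) : Nat) : Int) = start + period * (1 + (m : Int)) := by
    push_cast [hkp, hps]; ring
  have hinN' : start.toNat + period.toNat * (m + 1) ≤ seq.length := by omega
  have hstep : ∀ k, k < m →
      ((start + period + (k : Int) * period + period ≤ (seq.length : Int) ∧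
        PySem.List.slice seq (some (start + period + (k : Int) * period)) (some (start + period + (k : Int) * period + period)) =
          PySem.List.slice seq (some start) (some (start + period))) ↔
        (∀ i < period.toNat, seq[start.toNat + ((k+1) * period.toNat + i)]? = seq[start.toNat + i]?)) := by
    intro k hk
    have hb0 : (0 : Int) ≤ (k : Int) * period := mul_nonneg (by positivity) (by omega)
    have hb1 : (0 : Int) ≤ start + period + (k : Int) * period := by omega
    have h2 : ((k : Int) + 2) * period ≤ (1 + (m : Int)) * period := by
      apply mul_le_mul_of_nonneg_right _ (by omega)
      push_cast; omega
    have h3 : start + period + (k : Int) * period + period = start + ((k : Int) + 2) * period := by ring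
    have hbound : start + period + (k : Int) * period + period ≤ (seq.length : Int) := by
      rw [h3]
      have h4 : start + period * (1 + (m : Int)) = start + (1 + (m : Int)) * period := by ring
      linarith [hin, h2]
    rw [and_iff_right hbound]
    rw [pv_slice_eq_iff seq period _ _ hp hb1 h0 hbound (by linarith [hin, h2, mul_nonneg (by positivity : (0:Int) ≤ (k:Int)) (by omega : (0:Int) ≤ period)])]
    have hidxI : start + period + (k : Int) * period = ((start.toNat + ((k+1) * period.toNat) : Nat) : Int) := by
      push_cast [hkp, hps]; ring
    have hidx : (start + period + (k : Int) * period).toNat = start.toNat + (k+1) * period.toNat := by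
      rw [hidxI, Int.toNat_natCast]
    rw [hidx]
    constructor
    · intro h i hi
      have := h i hi
      rw [Nat.add_assoc] at this
      exact this
    · intro h i hi
      have := h i hi
      rw [Nat.add_assoc]
      exact this
  constructor
  · intro H j hj
    have hchain : seq[start.toNat + j]? = seq[start.toNat + (j + period.toNat)]? :=
      (pv_chain (fun x => seq[start.toNat + x]?) period.toNat m (by omega)).1
        (fun k hk i hi => (hstep k hk).1 (H k hk) i hi) j hj
    have hjN : start.toNat + j < seq.length := by
      have h5 : j < period.toNat * m := hj
      have h6 : period.toNat * m + period.toNat = period.toNat * (m + 1) := by ring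
      omega
    have hx : seq[start.toNat + j]? = some seq[start.toNat + j] := List.getElem?_eq_getElem hjN
    refine ⟨seq[start.toNat + j], ?_, ?_⟩
    · rw [List.getElem?_drop]; exact hx
    · rw [List.getElem?_drop, ← hchain]
      exact hx
  · intro H k hk
    apply (hstep k hk).2
    intro i hi
    apply (pv_chain (fun x => seq[start.toNat + x]?) period.toNat m (by omega)).2 _ k hk i hi
    intro j hj
    obtain ⟨x, h1, h2⟩ := H j hj
    rw [List.getElem?_drop] at h1
    rw [List.getElem?_drop] at h2
    show seq[start.toNat + j]? = seq[start.toNat + (j + period.toNat)]?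
    rw [h1, h2]

-- ---- pointwise equivalence of the two per-start tests ----
theorem pv_nonconst_iff (seq : List String) (period start : Int)
    (hp : 1 ≤ period) (h0 : 0 ≤ start) (hn : start ≤ (seq.length : Int)) :
    (1 < (PySem.Set.ofList (PySem.List.slice seq (some start) (some (start + period)))).length) ↔
      ((pvNdT ((seq.length : Int) + period) seq).getD start.toNat 0 < period - 1) := by
  have hs : start.toNat ≤ seq.length := by omega
  rw [pv_slice_take_drop seq start period hp h0, pv_set_card_gt_one, pv_exists_ne_iff_adjacent,
    pvNdT_getD _ _ _ hs]
  have hcast : period - 1 = ((period.toNat - 1 : Nat) : Int) := by omega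
  rw [hcast, pvNdT_head_lt _ _ _ (by omega)]
  have hk1 : 1 ≤ period.toNat := by omega
  constructor
  · rintro ⟨j, hj, hne⟩
    rw [List.length_take, List.length_drop] at hj
    refine ⟨j, by omega, by rw [List.length_drop]; omega, ?_⟩
    rw [pv_getElem?_take _ _ _ (by omega), pv_getElem?_take _ _ _ (by omega)] at hne
    exact hne
  · rintro ⟨j, hj1, hj2, hne⟩
    rw [List.length_drop] at hj2
    refine ⟨j, ?_, ?_⟩
    · rw [List.length_take, List.length_drop]; omega
    · rw [pv_getElem?_take _ _ _ (by omega), pv_getElem?_take _ _ _ (by omega)]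
      exact hne

theorem pv_repeat_iff (seq : List String) (period min_repeats start : Int)
    (hp : 1 ≤ period) (h0 : 0 ≤ start) (hn : start ≤ (seq.length : Int))
    (hmr : 1 ≤ min_repeats → start + period * min_repeats ≤ (seq.length : Int)) :
    (min_repeats ≤ pvLoopA seq (PySem.List.slice seq (some start) (some (start + period))) period
        (seq.length + 1) (start + period) 1) ↔
      (max (period * (min_repeats - 1)) 0 ≤ (pvRunT period.toNat seq).getD start.toNat 0) := by
  rcases Int.lt_or_le min_repeats 1 with hlt | hge
  · have hL : min_repeats ≤ pvLoopA seq (PySem.List.slice seq (some start) (some (start + period))) period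
        (seq.length + 1) (start + period) 1 := by
      have := pvLoopA_ge_init seq (PySem.List.slice seq (some start) (some (start + period))) period
        (seq.length + 1) (start + period) 1
      omega
    have hnp : period * (min_repeats - 1) ≤ 0 := by nlinarith
    rw [max_eq_right hnp, pvRunT_getD _ _ _ (by omega)]
    exact iff_of_true hL (pvRunT_head_nonneg _ _)
  · have hsn := hmr hge
    set m := (min_repeats - 1).toNat with hmdef
    have hm' : (m : Int) = min_repeats - 1 := by omega
    have hmrn : min_repeats ≤ (seq.length : Int) := by
      have h1 : min_repeats ≤ period * min_repeats := le_mul_of_one_le_left (by omega) hp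
      omega
    have hfuel : m ≤ seq.length + 1 := by omega
    have hiff := pvLoopA_ge seq (PySem.List.slice seq (some start) (some (start + period))) period m
      (seq.length + 1) hfuel (start + period) 1
    have hnn : 0 ≤ period * (min_repeats - 1) := mul_nonneg (by omega) (by omega)
    rw [max_eq_left hnn, pvRunT_getD _ _ _ (by omega)]
    have hkp : ((period.toNat : Nat) : Int) = period := Int.toNat_of_nonneg (by omega)
    have hcast : period * (min_repeats - 1) = ((period.toNat * m : Nat) : Int) := by
      push_cast [hkp, hm']; ring
    rw [hcast, pvRunT_head_ge]
    have hL : min_repeats = 1 + (m : Int) := by omega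
    rw [hL, hiff]
    apply pv_bridge seq period start m hp h0
    rw [show (1 : Int) + (m : Int) = min_repeats by omega]
    rw [show period * min_repeats = min_repeats * period by ring] at hsn ⊢
    omega

theorem pv_pointwise (seq : List String) (period min_repeats start : Int)
    (hp : 1 ≤ period) (h0 : 0 ≤ start) (hn : start ≤ (seq.length : Int))
    (hmr : 1 ≤ min_repeats → start + period * min_repeats ≤ (seq.length : Int)) :
    (decide (min_repeats ≤ pvLoopA seq (PySem.List.slice seq (some start) (some (start + period))) period
        (seq.length + 1) (start + period) 1) &&
      decide (1 < (PySem.Set.ofList (PySem.List.slice seq (some start) (some (start + period)))).length)) =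
    (decide (max (period * (min_repeats - 1)) 0 ≤ (pvRunT period.toNat seq).getD start.toNat 0) &&
      decide ((pvNdT ((seq.length : Int) + period) seq).getD start.toNat 0 < period - 1)) := by
  congr 1
  · exact decide_eq_decide.2 (pv_repeat_iff seq period min_repeats start hp h0 hn hmr)
  · exact decide_eq_decide.2 (pv_nonconst_iff seq period start hp h0 hn)

theorem pv_any_drop_tail (f : Int → Bool) (n K : Int) (hn0 : 0 ≤ n) (hnK : n ≤ K)
    (h : ∀ x, n + 1 ≤ x → x < K + 1 → f x = false) :
    (PySem.List.pyRange 0 (K+1) 1).any f = (PySem.List.pyRange 0 (n+1) 1).any f := by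
  rw [PySem.List.pyRange_one_append 0 (n+1) (K+1) (by omega) (by omega), List.any_append]
  have h2 : (PySem.List.pyRange (n+1) (K+1) 1).any f = false := by
    rw [List.any_eq_false]
    intro x hx
    rw [PySem.List.mem_pyRange_one] at hx
    simp [h x hx.1 hx.2]
  rw [h2, Bool.or_false]

-- ===== VERDICT (by name: the statement is the Claim_ definition above) =====
theorem find_repeating_pattern_py_spec : Claim_equal_find_repeating_pattern_py := by
  intro seq period min_repeats _hdom hpre
  unfold Spec_find_repeating_pattern_py
  unfold find_repeating_pattern_py find_repeating_pattern_py_alt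
  by_cases hguard : (seq.length : Int) < period * min_repeats
  · simp [hguard]
  · have hp : 1 ≤ period := by
      rcases hpre with h | h
      · exact h
      · exact absurd h hguard
    rw [if_neg hguard, if_neg (by simp [hguard]; omega)]
    rw [pvOuterA_eq_any seq period min_repeats _ 0 (by omega)]
    rcases Int.lt_or_le min_repeats 1 with hmr0 | hmr1
    · have hpm : period * min_repeats ≤ 0 := by nlinarith
      rw [min_eq_right (by omega : (seq.length:Int) ≤ (seq.length:Int) - period * min_repeats)]
      rw [pv_any_drop_tail _ (seq.length : Int) ((seq.length:Int) - period * min_repeats) (by omega) (by omega) ?tail]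
      case tail =>
        intro x hx1 _hx2
        have hsl : PySem.List.slice seq (some x) (some (x + period)) = [] := by
          rw [pv_slice_take_drop seq x period hp (by omega)]
          rw [List.drop_eq_nil_of_le (by omega : seq.length ≤ x.toNat)]
          simp
        simp [hsl, PySem.Set.ofList]
      apply pv_any_congr_mem
      intro x hx
      rw [PySem.List.mem_pyRange_one] at hx
      dsimp only
      exact pv_pointwise seq period min_repeats x hp hx.1 (by omega) (fun h => absurd h (by omega))
    · have hnn : 0 ≤ period * min_repeats := mul_nonneg (by omega) (by omega)
      rw [min_eq_left (by omega : (seq.length:Int) - period * min_repeats ≤ (seq.length:Int))]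
      apply pv_any_congr_mem
      intro x hx
      rw [PySem.List.mem_pyRange_one] at hx
      dsimp only
      exact pv_pointwise seq period min_repeats x hp hx.1 (by omega) (fun _ => by omega)
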